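-- pv_equiv track=rewrite | github.com/vijaykumarreddybandlapalli/Backend_Pracite | backend/day03(some basics programs)/ex1.py | distinct_final_strings
-- ===== SOURCE A (Python) =====
-- def flip_all(s):
--     return ''.join('1' if c == '0' else '0' for c in s)
--
-- def flip_odd(s):
--     return ''.join(s[i] if i % 2 == 0 else ('1' if s[i] == '0' else '0') for i in range(len(s)))
--
-- def flip_even(s):
--     return ''.join(('1' if s[i] == '0' else '0') if i % 2 == 0 else s[i] for i in range(len(s)))
--
-- def flip_3k1(s):
--     return ''.join(('1' if s[i] == '0' else '0') if (i - 1) % 3 == 0 else s[i] for i in range(len(s)))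
--
-- def distinct_final_strings(N, M, operations):
--     initial_string = '1' * N  # Start with all '1's
--     current_strings = {initial_string}  # Use a set to store unique strings
--
--     for _ in range(M):
--         next_strings = set()  # Prepare for the next iteration
--         for s in current_strings:  # Iterate over current unique strings
--             for op in operations:
--                 if op == 1:
--                     next_strings.add(flip_all(s))
--                 elif op == 2:
--                     next_strings.add(flip_odd(s))
--                 elif op == 3:
--                     next_strings.add(flip_even(s))
--                 elif op == 4:
--                     next_strings.add(flip_3k1(s))
--         current_strings = next_strings  # Move to the next iteration's results
--
--     return len(current_strings)  # Return the count of unique strings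
-- ===== SOURCE B (Python) =====
-- def _flip(s, op):
--     if op == 1:
--         return ''.join('1' if c == '0' else '0' for c in s)
--     if op == 2:
--         return ''.join(('1' if c == '0' else '0') if i % 2 == 1 else c for i, c in enumerate(s))
--     if op == 3:
--         return ''.join(('1' if c == '0' else '0') if i % 2 == 0 else c for i, c in enumerate(s))
--     # op == 4: positions i with (i-1) % 3 == 0, i.e. i % 3 == 1 for i >= 0
--     return ''.join(('1' if c == '0' else '0') if i % 3 == 1 else c for i, c in enumerate(s))
--
-- def distinct_final_strings(N, M, operations):
--     ops = [op for op in dict.fromkeys(operations) if 1 <= op <= 4]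
--     cur = {'1' * max(N, 0)}
--     prev = None
--     k = 0
--     # The sequence of reachable-string sets becomes periodic with period 2 very
--     # quickly (each flip is an involution), so detect S_{k+1} == S_{k-1} and
--     # answer by the parity of the remaining steps instead of iterating M times.
--     while k < M:
--         nxt = {_flip(s, op) for s in cur for op in ops}
--         if nxt == prev:
--             return len(prev) if (M - k - 1) % 2 == 0 else len(cur)
--         prev, cur = cur, nxt
--         k += 1
--     return len(cur)
-- ===== Notes on version B (the rewrite author's own statement) =====
-- stated objective: alternative
-- what changed: Instead of iterating the set transformation M times, B deduplicates and filters the operations once and detects the period-2 cycle that the involutive flip operations force on the sequence of reachable-string sets (S_{k+1} == S_{k-1}), answering by the parity of the remaining steps.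
import Mathlib
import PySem

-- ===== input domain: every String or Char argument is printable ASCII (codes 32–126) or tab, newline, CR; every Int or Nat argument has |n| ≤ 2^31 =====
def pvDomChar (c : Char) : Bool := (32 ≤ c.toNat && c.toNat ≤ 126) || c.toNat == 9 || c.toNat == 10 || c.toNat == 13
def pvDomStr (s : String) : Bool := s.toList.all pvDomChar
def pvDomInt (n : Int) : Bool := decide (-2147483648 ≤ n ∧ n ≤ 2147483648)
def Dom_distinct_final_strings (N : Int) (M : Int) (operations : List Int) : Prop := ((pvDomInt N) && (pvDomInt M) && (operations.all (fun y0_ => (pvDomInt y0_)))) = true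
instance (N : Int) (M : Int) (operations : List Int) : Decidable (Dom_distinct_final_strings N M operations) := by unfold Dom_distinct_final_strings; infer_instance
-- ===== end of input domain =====

-- B is an alternative algorithm: instead of iterating the set transformation M times it detects the
-- period-2 cycle the (involutive) flip operations force on the sequence of reachable-string sets and
-- answers by the parity of the remaining steps; the operations are deduplicated and filtered once.
-- Python strings of '0'/'1' are modelled as List Char (the return value is an Int, so only Int/List Int cross the boundary).

-- ===== PORT A =====
def pvFlipAll (s : List Char) : List Char :=
  s.map (fun c => if c = '0' then '1' else '0')

def pvFlipOdd (s : List Char) : List Char :=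
  s.zipIdx.map (fun ci => if ci.2 % 2 = 0 then ci.1 else (if ci.1 = '0' then '1' else '0'))

def pvFlipEven (s : List Char) : List Char :=
  s.zipIdx.map (fun ci => if ci.2 % 2 = 0 then (if ci.1 = '0' then '1' else '0') else ci.1)

-- Python's (i-1) % 3 with i = 0 is 2 (floor mod), hence the Int-valued PySem.Int.mod
def pvFlip3k1 (s : List Char) : List Char :=
  s.zipIdx.map (fun ci => if PySem.Int.mod ((ci.2 : Int) - 1) 3 = 0 then (if ci.1 = '0' then '1' else '0') else ci.1)

def pvStepA (operations : List Int) (cur : PySem.Set (List Char)) : PySem.Set (List Char) :=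
  cur.foldl (fun acc s =>
    operations.foldl (fun acc op =>
      if op = 1 then PySem.Set.add acc (pvFlipAll s)
      else if op = 2 then PySem.Set.add acc (pvFlipOdd s)
      else if op = 3 then PySem.Set.add acc (pvFlipEven s)
      else if op = 4 then PySem.Set.add acc (pvFlip3k1 s)
      else acc) acc) PySem.Set.empty

-- 'for _ in range(M)': M iterations, no loop variable used (range is lazy in Python, so a countdown)
def pvIterA (operations : List Int) : Nat → PySem.Set (List Char) → PySem.Set (List Char)
  | 0, cur => cur
  | m+1, cur => pvIterA operations m (pvStepA operations cur)

def distinct_final_strings (N : Int) (M : Int) (operations : List Int) : Int :=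
  let initial : List Char := List.replicate N.toNat '1'   -- '1' * N (clamps negatives, as Python does)
  let final := pvIterA operations M.toNat (PySem.Set.ofList [initial])
  PySem.Set.len final

-- ===== PORT B =====
def pvFlipB (op : Int) (s : List Char) : List Char :=
  if op = 1 then s.map (fun c => if c = '0' then '1' else '0')
  else if op = 2 then s.zipIdx.map (fun ci => if ci.2 % 2 = 1 then (if ci.1 = '0' then '1' else '0') else ci.1)
  else if op = 3 then s.zipIdx.map (fun ci => if ci.2 % 2 = 0 then (if ci.1 = '0' then '1' else '0') else ci.1)
  else s.zipIdx.map (fun ci => if ci.2 % 3 = 1 then (if ci.1 = '0' then '1' else '0') else ci.1)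

def pvOpsB (operations : List Int) : List Int :=
  (PySem.List.dedup operations).filter (fun op => decide (1 ≤ op) && decide (op ≤ 4))

def pvStepB (ops : List Int) (cur : PySem.Set (List Char)) : PySem.Set (List Char) :=
  cur.foldl (fun acc s => ops.foldl (fun acc op => PySem.Set.add acc (pvFlipB op s)) acc) PySem.Set.empty

-- the while-loop: fuel = M - k remaining iterations; prev = S_{k-1} (None before the first step)
def pvLoopB (ops : List Int) : Nat → Option (PySem.Set (List Char)) → PySem.Set (List Char) → Int
  | 0, _, cur => PySem.Set.len cur
  | f+1, prev, cur =>
    let nxt := pvStepB ops cur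
    match prev with
    | some p =>
        if PySem.Set.equal nxt p then
          (if f % 2 = 0 then PySem.Set.len p else PySem.Set.len cur)
        else pvLoopB ops f (some cur) nxt
    | none => pvLoopB ops f (some cur) nxt

def distinct_final_strings_alt (N : Int) (M : Int) (operations : List Int) : Int :=
  let ops := pvOpsB operations
  let initial : List Char := List.replicate (max N 0).toNat '1'
  pvLoopB ops M.toNat none (PySem.Set.ofList [initial])

-- ===== PRECONDITION & SPEC =====
def Spec_distinct_final_strings (N : Int) (M : Int) (operations : List Int) (out : Int) : Prop := out = distinct_final_strings_alt N M operations
instance (N : Int) (M : Int) (operations : List Int) (out : Int) : Decidable (Spec_distinct_final_strings N M operations out) := by unfold Spec_distinct_final_strings; infer_instance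

-- ===== CLAIM (what is proved, stated in full; the proofs are below) =====
def Claim_equal_distinct_final_strings : Prop := ∀ (N : Int) (M : Int) (operations : List Int), Dom_distinct_final_strings N M operations → Spec_distinct_final_strings N M operations (distinct_final_strings N M operations)

-- ===== LEMMAS AND PROOFS =====

-- A's four branches as one optional map (none = the op is ignored)
def pvApplyOp (s : List Char) (op : Int) : Option (List Char) :=
  if op = 1 then some (pvFlipAll s)
  else if op = 2 then some (pvFlipOdd s)
  else if op = 3 then some (pvFlipEven s)
  else if op = 4 then some (pvFlip3k1 s)
  else none

def pvGenStep (f : List Char → Int → Option (List Char)) (ops : List Int) (cur : PySem.Set (List Char)) : PySem.Set (List Char) :=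
  cur.foldl (fun acc s => ops.foldl (fun acc op =>
    match f s op with
    | some t => PySem.Set.add acc t
    | none => acc) acc) PySem.Set.empty

lemma stepA_eq_gen (ops : List Int) (cur : PySem.Set (List Char)) :
    pvStepA ops cur = pvGenStep pvApplyOp ops cur := by
  unfold pvStepA pvGenStep
  congr 1
  funext acc s
  congr 1
  funext a op
  simp only [pvApplyOp]
  split_ifs <;> rfl

lemma stepB_eq_gen (ops : List Int) (cur : PySem.Set (List Char)) :
    pvStepB ops cur = pvGenStep (fun s op => some (pvFlipB op s)) ops cur := rfl

lemma mem_foldl_addOpt (f : List Char → Int → Option (List Char)) (s : List Char)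
    (l : List Int) (acc : PySem.Set (List Char)) (x : List Char) :
    x ∈ l.foldl (fun a op => match f s op with | some t => PySem.Set.add a t | none => a) acc
      ↔ x ∈ acc ∨ ∃ op ∈ l, f s op = some x := by
  induction l generalizing acc with
  | nil => simp
  | cons hd tl ih =>
    simp only [List.foldl_cons, ih]
    cases h : f s hd with
    | none =>
      constructor
      · rintro (hx | ⟨op, hop, hfx⟩)
        · exact Or.inl hx
        · exact Or.inr ⟨op, List.mem_cons_of_mem _ hop, hfx⟩
      · rintro (hx | ⟨op, hop, hfx⟩)
        · exact Or.inl hx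
        · rcases List.mem_cons.1 hop with rfl | hop
          · rw [h] at hfx; cases hfx
          · exact Or.inr ⟨op, hop, hfx⟩
    | some t =>
      simp only [PySem.Set.mem_add]
      constructor
      · rintro ((hx | rfl) | ⟨op, hop, hfx⟩)
        · exact Or.inl hx
        · exact Or.inr ⟨hd, List.mem_cons_self .., h⟩
        · exact Or.inr ⟨op, List.mem_cons_of_mem _ hop, hfx⟩
      · rintro (hx | ⟨op, hop, hfx⟩)
        · exact Or.inl (Or.inl hx)
        · rcases List.mem_cons.1 hop with rfl | hop
          · rw [h] at hfx; exact Or.inl (Or.inr (Option.some_inj.1 hfx).symm)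
          · exact Or.inr ⟨op, hop, hfx⟩

lemma nodup_foldl_addOpt (f : List Char → Int → Option (List Char)) (s : List Char)
    (l : List Int) (acc : PySem.Set (List Char)) (h : acc.Nodup) :
    (l.foldl (fun a op => match f s op with | some t => PySem.Set.add a t | none => a) acc).Nodup := by
  induction l generalizing acc with
  | nil => exact h
  | cons hd tl ih =>
    simp only [List.foldl_cons]
    cases hf : f s hd with
    | none => exact ih _ h
    | some t => exact ih _ (PySem.Set.nodup_add _ _ h)

lemma mem_genStep (f : List Char → Int → Option (List Char)) (ops : List Int)
    (cur : PySem.Set (List Char)) (x : List Char) :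
    x ∈ pvGenStep f ops cur ↔ ∃ s ∈ cur, ∃ op ∈ ops, f s op = some x := by
  unfold pvGenStep
  have main : ∀ (c : List (List Char)) (acc : PySem.Set (List Char)),
      x ∈ c.foldl (fun acc s => ops.foldl (fun a op =>
          match f s op with | some t => PySem.Set.add a t | none => a) acc) acc
        ↔ x ∈ acc ∨ ∃ s ∈ c, ∃ op ∈ ops, f s op = some x := by
    intro c
    induction c with
    | nil => simp
    | cons hd tl ih =>
      intro acc
      simp only [List.foldl_cons, ih, mem_foldl_addOpt]
      constructor
      · rintro ((hx | ⟨op, hop, hfx⟩) | ⟨s, hs, hrest⟩)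
        · exact Or.inl hx
        · exact Or.inr ⟨hd, List.mem_cons_self .., op, hop, hfx⟩
        · exact Or.inr ⟨s, List.mem_cons_of_mem _ hs, hrest⟩
      · rintro (hx | ⟨s, hs, hrest⟩)
        · exact Or.inl (Or.inl hx)
        · rcases List.mem_cons.1 hs with rfl | hs
          · exact Or.inl (Or.inr hrest)
          · exact Or.inr ⟨s, hs, hrest⟩
  rw [main]
  simp [PySem.Set.empty]

lemma nodup_genStep (f : List Char → Int → Option (List Char)) (ops : List Int)
    (cur : PySem.Set (List Char)) : (pvGenStep f ops cur).Nodup := by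
  unfold pvGenStep
  have main : ∀ (c : List (List Char)) (acc : PySem.Set (List Char)), acc.Nodup →
      (c.foldl (fun acc s => ops.foldl (fun a op =>
          match f s op with | some t => PySem.Set.add a t | none => a) acc) acc).Nodup := by
    intro c
    induction c with
    | nil => exact fun _ h => h
    | cons hd tl ih => exact fun acc h => ih _ (nodup_foldl_addOpt f hd ops acc h)
  exact main cur _ (by simp [PySem.Set.empty])

-- the four flips agree
lemma flipB_one (s : List Char) : pvFlipB 1 s = pvFlipAll s := by
  unfold pvFlipB pvFlipAll
  norm_num

lemma flipB_two (s : List Char) : pvFlipB 2 s = pvFlipOdd s := by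
  unfold pvFlipB pvFlipOdd
  norm_num
  intro c i _
  by_cases h : i % 2 = 0
  · have h1 : ¬ (i % 2 = 1) := by omega
    simp [h1]
  · have h1 : i % 2 = 1 := by omega
    simp [h1]

lemma flipB_three (s : List Char) : pvFlipB 3 s = pvFlipEven s := by
  unfold pvFlipB pvFlipEven
  norm_num

lemma flipB_four (s : List Char) : pvFlipB 4 s = pvFlip3k1 s := by
  unfold pvFlipB pvFlip3k1
  norm_num
  intro c i _
  by_cases h : i % 3 = 1
  · have hd : (3:Int) ∣ (i : Int) - 1 := by omega
    simp [h, hd]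
  · have hd : ¬ ((3:Int) ∣ (i : Int) - 1) := by omega
    simp [h, hd]

lemma applyOp_eq_flipB (s : List Char) (op : Int) (h1 : 1 ≤ op) (h2 : op ≤ 4) :
    pvApplyOp s op = some (pvFlipB op s) := by
  interval_cases op
  · simp [pvApplyOp, flipB_one]
  · simp [pvApplyOp, flipB_two]
  · simp [pvApplyOp, flipB_three]
  · simp [pvApplyOp, flipB_four]

lemma applyOp_none (s : List Char) (op : Int) (h : ¬ (1 ≤ op ∧ op ≤ 4)) :
    pvApplyOp s op = none := by
  unfold pvApplyOp
  split_ifs with h1 h2 h3 h4 <;> first | (exfalso; omega) | rfl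

lemma mem_opsB (operations : List Int) (op : Int) :
    op ∈ pvOpsB operations ↔ op ∈ operations ∧ 1 ≤ op ∧ op ≤ 4 := by
  unfold pvOpsB
  rw [List.mem_filter]
  simp

-- same-members relation on sets of strings
def pvMemEq (s t : PySem.Set (List Char)) : Prop := ∀ x, x ∈ s ↔ x ∈ t

lemma pvMemEq.refl (s : PySem.Set (List Char)) : pvMemEq s s := fun _ => Iff.rfl
lemma pvMemEq.symm' {s t : PySem.Set (List Char)} (h : pvMemEq s t) : pvMemEq t s := fun x => (h x).symm
lemma pvMemEq.trans' {s t u : PySem.Set (List Char)} (h1 : pvMemEq s t) (h2 : pvMemEq t u) : pvMemEq s u :=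
  fun x => (h1 x).trans (h2 x)

lemma len_eq_of_memEq {s t : PySem.Set (List Char)} (h : pvMemEq s t)
    (hs : s.Nodup) (ht : t.Nodup) : PySem.Set.len s = PySem.Set.len t := by
  have : s.Perm t := (List.perm_ext_iff_of_nodup hs ht).2 h
  simp [PySem.Set.len, this.length_eq]

-- stepB on a set with the same members as cur has the same members as stepA on cur
lemma stepB_memEq_stepA (operations : List Int) {cur cur' : PySem.Set (List Char)}
    (h : pvMemEq cur cur') :
    pvMemEq (pvStepA operations cur) (pvStepB (pvOpsB operations) cur') := by
  intro x
  rw [stepA_eq_gen, stepB_eq_gen, mem_genStep, mem_genStep]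
  constructor
  · rintro ⟨s, hs, op, hop, hfx⟩
    have hrange : 1 ≤ op ∧ op ≤ 4 := by
      by_contra hc
      rw [applyOp_none s op hc] at hfx
      cases hfx
    refine ⟨s, (h s).1 hs, op, (mem_opsB operations op).2 ⟨hop, hrange⟩, ?_⟩
    rw [applyOp_eq_flipB s op hrange.1 hrange.2] at hfx
    exact hfx
  · rintro ⟨s, hs, op, hop, hfx⟩
    obtain ⟨hmem, hr1, hr2⟩ := (mem_opsB operations op).1 hop
    exact ⟨s, (h s).2 hs, op, hmem, by rw [applyOp_eq_flipB s op hr1 hr2]; exact hfx⟩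

lemma stepA_congr (operations : List Int) {cur cur' : PySem.Set (List Char)}
    (h : pvMemEq cur cur') : pvMemEq (pvStepA operations cur) (pvStepA operations cur') := by
  intro x
  rw [stepA_eq_gen, stepA_eq_gen, mem_genStep, mem_genStep]
  constructor
  · rintro ⟨s, hs, rest⟩; exact ⟨s, (h s).1 hs, rest⟩
  · rintro ⟨s, hs, rest⟩; exact ⟨s, (h s).2 hs, rest⟩

-- A's state sequence
def pvS (operations : List Int) (init : PySem.Set (List Char)) (k : Nat) : PySem.Set (List Char) :=
  (pvStepA operations)^[k] init

lemma pvS_succ (operations : List Int) (init : PySem.Set (List Char)) (k : Nat) :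
    pvS operations init (k+1) = pvStepA operations (pvS operations init k) :=
  Function.iterate_succ_apply' _ _ _

lemma nodup_pvS (operations : List Int) (init : PySem.Set (List Char)) (h : init.Nodup) :
    ∀ k, (pvS operations init k).Nodup := by
  intro k
  induction k with
  | zero => exact h
  | succ k _ => rw [pvS_succ, stepA_eq_gen]; exact nodup_genStep _ _ _

lemma iterA_eq_iterate (operations : List Int) :
    ∀ (n : Nat) (acc : PySem.Set (List Char)),
      pvIterA operations n acc = (pvStepA operations)^[n] acc := by
  intro n
  induction n with
  | zero => intro acc; rfl
  | succ n ih =>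
    intro acc
    rw [pvIterA, ih, ← Function.iterate_succ_apply]

-- once S_a and S_{a+2} have the same members, the sequence is periodic (period 2) from a on
lemma per2 (operations : List Int) (init : PySem.Set (List Char)) (a : Nat)
    (h : pvMemEq (pvS operations init a) (pvS operations init (a+2))) :
    ∀ m, pvMemEq (pvS operations init (a+m)) (pvS operations init (a+m+2)) := by
  intro m
  induction m with
  | zero => exact h
  | succ m ih =>
    have e2 : a + m + 1 + 2 = (a + m + 2) + 1 := by omega
    show pvMemEq (pvS operations init ((a + m) + 1)) (pvS operations init (a + m + 1 + 2))
    rw [e2, pvS_succ, pvS_succ]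
    exact stepA_congr operations ih

lemma per_reduce (operations : List Int) (init : PySem.Set (List Char)) (a : Nat)
    (h : pvMemEq (pvS operations init a) (pvS operations init (a+2))) :
    ∀ q r, pvMemEq (pvS operations init (a + (2*q + r))) (pvS operations init (a + r)) := by
  intro q
  induction q with
  | zero => intro r; simpa using pvMemEq.refl _
  | succ q ih =>
    intro r
    have e : a + (2*(q+1) + r) = a + (2*q + r) + 2 := by omega
    rw [e]
    exact ((per2 operations init a h (2*q + r)).symm').trans' (ih r)

-- main loop invariant: after k steps, fuel f = remaining steps, cur ≈ S k, prev ≈ S (k-1)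
lemma loopB_correct (operations : List Int) (init : PySem.Set (List Char)) (hinit : init.Nodup) :
    ∀ (f k : Nat) (prev : Option (PySem.Set (List Char))) (cur : PySem.Set (List Char)),
      cur.Nodup → pvMemEq cur (pvS operations init k) →
      (prev = none ∨ ∃ p k', prev = some p ∧ p.Nodup ∧ k = k' + 1 ∧ pvMemEq p (pvS operations init k')) →
      pvLoopB (pvOpsB operations) f prev cur = PySem.Set.len (pvS operations init (k + f)) := by
  intro f
  induction f with
  | zero =>
    intro k prev cur hnd hmem _
    simp only [pvLoopB]
    exact len_eq_of_memEq hmem hnd (nodup_pvS operations init hinit k)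
  | succ f ih =>
    intro k prev cur hnd hmem hprev
    have hnxt : pvMemEq (pvStepB (pvOpsB operations) cur) (pvS operations init (k+1)) := by
      rw [pvS_succ]
      exact (stepB_memEq_stepA operations hmem.symm').symm'
    have hnxtnd : (pvStepB (pvOpsB operations) cur).Nodup := by
      rw [stepB_eq_gen]; exact nodup_genStep _ _ _
    rcases hprev with rfl | ⟨p, k', rfl, hpnd, rfl, hpmem⟩
    · simp only [pvLoopB]
      have e : k + (f+1) = (k+1) + f := by omega
      rw [e]
      exact ih (k+1) (some cur) _ hnxtnd hnxt (Or.inr ⟨cur, k, rfl, hnd, rfl, hmem⟩)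
    · simp only [pvLoopB]
      by_cases heq : PySem.Set.equal (pvStepB (pvOpsB operations) cur) p = true
      · rw [if_pos heq]
        -- S_{k'} ≈ S_{k'+2}: the cycle
        have hcyc : pvMemEq (pvS operations init k') (pvS operations init (k'+2)) := by
          have h1 : pvMemEq (pvStepB (pvOpsB operations) cur) p := (PySem.Set.equal_iff _ _).1 heq
        -- S_{k'+2} = S_{(k'+1)+1} ≈ nxt ≈ p ≈ S_{k'}
          exact (hpmem.symm'.trans' (h1.symm'.trans' hnxt))
        have hsplit : 2 * (f / 2) + f % 2 = f := by omega
        by_cases hf : f % 2 = 0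
        · rw [if_pos hf]
          -- target index k'+1 + (f+1) = k' + (2*(f/2+1) + 0)
          have e : k' + 1 + (f + 1) = k' + (2*(f/2 + 1) + 0) := by omega
          rw [e]
          have := per_reduce operations init k' hcyc (f/2 + 1) 0
          simp only [Nat.add_zero] at this
          exact len_eq_of_memEq (hpmem.trans' this.symm') hpnd (nodup_pvS operations init hinit _)
        · rw [if_neg hf]
          have e : k' + 1 + (f + 1) = k' + (2*(f/2 + 1) + 1) := by omega
          rw [e]
          have := per_reduce operations init k' hcyc (f/2 + 1) 1
          exact len_eq_of_memEq (hmem.trans' this.symm') hnd (nodup_pvS operations init hinit _)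
      · rw [if_neg heq]
        have e : k' + 1 + (f+1) = (k'+1+1) + f := by omega
        rw [e]
        exact ih (k'+1+1) (some cur) _ hnxtnd hnxt (Or.inr ⟨cur, k'+1, rfl, hnd, rfl, hmem⟩)

-- ===== VERDICT (by name: the statement is the Claim_ definition above) =====
theorem distinct_final_strings_spec : Claim_equal_distinct_final_strings := by
  intro N M operations _
  unfold Spec_distinct_final_strings distinct_final_strings distinct_final_strings_alt
  have hmax : (max N 0).toNat = N.toNat := by omega
  simp only [hmax, iterA_eq_iterate]
  have h := loopB_correct operations (PySem.Set.ofList [List.replicate N.toNat '1'])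
    (PySem.Set.nodup_ofList _) M.toNat 0 none _ (PySem.Set.nodup_ofList _) (pvMemEq.refl _) (Or.inl rfl)
  simp only [Nat.zero_add] at h
  rw [h]
  rfl
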